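-- pv_equiv track=rewrite | github.com/tingc9/karaka_mapping | process_ssf.py | get_chunk_strings
-- ===== SOURCE A (Python) =====
-- def get_chunk_strings(sentence_string):
-- 	# remove <Sentence> tags
-- 	sentence_string = "\n".join(sentence_string.split("\n")[1:-1])
-- 	# remove SSF chunk
-- 	# BEWARE SSF chunk (normally chunk 0) is removed
-- 	if "SSF" in sentence_string.split("\n")[1]:
-- 		sentence_string = "\n".join(sentence_string.split("\n")[1:-1])
-- 	# track brackets to separate outer chunks
-- 	bracket_counter = 0
-- 	chunk_strings = []
-- 	current_chunk_string = ""
-- 	for line in sentence_string.split("\n"):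
-- 		if "((" in line:
-- 			current_chunk_string += line + "\n"
-- 			bracket_counter += 1
-- 		elif "))" in line:
-- 			current_chunk_string += line + "\n"
-- 			bracket_counter -= 1
-- 		else:
-- 			current_chunk_string += line + "\n"
-- 		if bracket_counter == 0:
-- 			chunk_strings.append(current_chunk_string)
-- 			# reset current chunk string
-- 			current_chunk_string = ""
-- 	return chunk_strings
-- ===== SOURCE B (Python) =====
-- def get_chunk_strings(sentence_string):
--     # identical preprocessing: strip <Sentence> tags, then the SSF chunk if present
--     sentence_string = "\n".join(sentence_string.split("\n")[1:-1])
--     if "SSF" in sentence_string.split("\n")[1]: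
--         sentence_string = "\n".join(sentence_string.split("\n")[1:-1])
--
--     def line_delta(line):
--         if "((" in line:
--             return 1
--         if "))" in line:
--             return -1
--         return 0
--
--     def split_first_chunk(lines):
--         depth = 0
--         for i, line in enumerate(lines):
--             depth += line_delta(line)
--             if depth == 0:
--                 return lines[:i + 1], lines[i + 1:]
--         return None  # no complete chunk left
--
--     chunks = []
--     rest = sentence_string.split("\n")
--     while True:
--         found = split_first_chunk(rest)
--         if found is None:
--             return chunks
--         chunk_lines, rest = found
--         chunk = ""
--         for line in chunk_lines:
--             chunk += line + "\n"
--         chunks.append(chunk)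
-- ===== Notes on version B (the rewrite author's own statement) =====
-- stated objective: alternative
-- what changed: B keeps A's preprocessing but replaces A's single stateful loop (bracket counter + growing current-chunk string + append-on-zero) with a recursive decomposition: repeatedly split off the first depth-balanced group of lines, then render each group; the incomplete trailing group is discarded naturally.
import Mathlib
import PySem

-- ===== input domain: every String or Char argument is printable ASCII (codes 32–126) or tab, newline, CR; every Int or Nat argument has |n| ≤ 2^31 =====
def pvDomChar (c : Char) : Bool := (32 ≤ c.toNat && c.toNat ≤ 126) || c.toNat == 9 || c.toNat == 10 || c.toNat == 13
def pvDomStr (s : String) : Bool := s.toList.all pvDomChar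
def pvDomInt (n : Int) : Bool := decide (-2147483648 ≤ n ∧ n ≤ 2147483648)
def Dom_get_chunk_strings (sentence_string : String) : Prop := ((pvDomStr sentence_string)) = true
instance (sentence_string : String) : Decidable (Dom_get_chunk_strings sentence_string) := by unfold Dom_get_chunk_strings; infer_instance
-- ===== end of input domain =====

-- B replaces A's single stateful loop (counter + growing current-chunk string) by a recursive
-- decomposition: split off the first depth-balanced group of lines, render it, recurse (objective: alternative).


-- shared exact helpers for the identical preprocessing of both Pythons:
-- splitting on the newline separator (nonempty, so Str.split? is always some) and joining lines[1:-1]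
def pvSplitNL (s : String) : List String := (PySem.Str.split? s "\n").getD []
def pvStripEnds (lines : List String) : String :=
  PySem.Str.join "\n" (PySem.List.slice lines (some 1) (some (-1)))

-- ===== PORT A =====
-- the for-loop of A over the lines, state = (bracket_counter, current_chunk_string, chunk_strings)
def pvLoopA : List String → Int → String → List String → List String
  | [], _, _, acc => acc
  | l :: ls, c, cur, acc =>
    let c' : Int := if PySem.Str.isIn "((" l then c + 1 else if PySem.Str.isIn "))" l then c - 1 else c
    let cur' : String := cur ++ l ++ "\n"
    if c' = 0 then pvLoopA ls c' "" (acc ++ [cur']) else pvLoopA ls c' cur' acc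

def get_chunk_strings (sentence_string : String) : List String :=
  -- s1 = input with the tag lines removed; indexing its second line raises IndexError when absent (excluded by Pre_)
  match PySem.List.pyGet? (pvSplitNL (pvStripEnds (pvSplitNL sentence_string))) 1 with
  | none => []
  | some line1 =>
    pvLoopA (pvSplitNL (if PySem.Str.isIn "SSF" line1
        then pvStripEnds (pvSplitNL (pvStripEnds (pvSplitNL sentence_string)))
        else pvStripEnds (pvSplitNL sentence_string))) 0 "" []

-- ===== PORT B =====
def pvLineDelta (l : String) : Int :=
  if PySem.Str.isIn "((" l then 1 else if PySem.Str.isIn "))" l then -1 else 0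

-- split_first_chunk: first prefix whose cumulative bracket depth (starting from d) returns to 0
def pvSplitFirst : List String → Int → Option (List String × List String)
  | [], _ => none
  | l :: ls, d =>
    let d' := d + pvLineDelta l
    if d' = 0 then some ([l], ls)
    else (pvSplitFirst ls d').map (fun pr => (l :: pr.1, pr.2))

theorem pvSplitFirst_rest_lt (ls : List String) (d : Int) (pre rest : List String)
    (h : pvSplitFirst ls d = some (pre, rest)) : rest.length < ls.length := by
  induction ls generalizing d pre rest with
  | nil => simp [pvSplitFirst] at h
  | cons l t ih =>
    simp only [pvSplitFirst] at h
    split at h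
    · simp only [Option.some.injEq, Prod.mk.injEq] at h
      simp [← h.2]
    · cases hh : pvSplitFirst t (d + pvLineDelta l) with
      | none => simp [hh] at h
      | some pr =>
        simp only [hh, Option.map_some] at h
        obtain ⟨p, r⟩ := pr
        simp only [Option.some.injEq, Prod.mk.injEq] at h
        have := ih (d + pvLineDelta l) p r hh
        simp [← h.2]; omega

-- chunk = ""; for line in chunk_lines: chunk += line + "\n"
def pvRender (chunk_lines : List String) : String :=
  chunk_lines.foldl (fun chunk line => chunk ++ line ++ "\n") ""

-- the while-loop of B: peel off the first complete chunk, render it, continue on the rest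
def pvChunks (lines : List String) : List String :=
  match h : pvSplitFirst lines 0 with
  | none => []
  | some (pre, rest) => pvRender pre :: pvChunks rest
termination_by lines.length
decreasing_by exact pvSplitFirst_rest_lt lines 0 pre rest h

def get_chunk_strings_alt (sentence_string : String) : List String :=
  -- identical preprocessing to A
  match PySem.List.pyGet? (pvSplitNL (pvStripEnds (pvSplitNL sentence_string))) 1 with
  | none => []
  | some line1 =>
    pvChunks (pvSplitNL (if PySem.Str.isIn "SSF" line1
        then pvStripEnds (pvSplitNL (pvStripEnds (pvSplitNL sentence_string)))
        else pvStripEnds (pvSplitNL sentence_string)))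

-- ===== PRECONDITION & SPEC =====
-- Pre_ excludes exactly the inputs with fewer than 4 lines, on which A raises IndexError
-- (after removing the first and last line fewer than 2 lines remain, so indexing the second one fails).
def Pre_get_chunk_strings (sentence_string : String) : Prop :=
  4 ≤ (pvSplitNL sentence_string).length
instance (sentence_string : String) : Decidable (Pre_get_chunk_strings sentence_string) := by
  unfold Pre_get_chunk_strings; infer_instance

def pvWitness_get_chunk_strings : String := "<Sentence>\n1\t((\tNP\n))\n</Sentence>"

def Spec_get_chunk_strings (sentence_string : String) (out : List String) : Prop :=
  out = get_chunk_strings_alt sentence_string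
instance (sentence_string : String) (out : List String) : Decidable (Spec_get_chunk_strings sentence_string out) := by
  unfold Spec_get_chunk_strings; infer_instance

-- ===== CLAIM (what is proved, stated in full; the proofs are below) =====
def Claim_equal_get_chunk_strings : Prop := ∀ (sentence_string : String), Dom_get_chunk_strings sentence_string → Pre_get_chunk_strings sentence_string → Spec_get_chunk_strings sentence_string (get_chunk_strings sentence_string)

-- ===== LEMMAS AND PROOFS =====

-- unfolding equation for the well-founded recursion pvChunks
theorem pvChunks_eq (lines : List String) :
    pvChunks lines = match pvSplitFirst lines 0 with
      | none => []
      | some (pre, rest) => pvRender pre :: pvChunks rest := by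
  rw [pvChunks]
  split <;> rename_i h <;> simp [h]

-- A's loop, from any state, produces acc ++ (the chunk completed from cur at depth c, then B's chunks)
theorem pvLoopA_eq (lines : List String) : ∀ (c : Int) (cur : String) (acc : List String),
    pvLoopA lines c cur acc = acc ++ (match pvSplitFirst lines c with
      | none => []
      | some (pre, rest) => pre.foldl (fun chunk line => chunk ++ line ++ "\n") cur :: pvChunks rest) := by
  induction lines with
  | nil => intro c cur acc; simp [pvLoopA, pvSplitFirst]
  | cons l ls ih =>
    intro c cur acc
    simp only [pvLoopA, pvSplitFirst]
    have hdelta : (if PySem.Str.isIn "((" l then c + 1 else if PySem.Str.isIn "))" l then c - 1 else c)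
        = c + pvLineDelta l := by
      unfold pvLineDelta; split_ifs <;> omega
    rw [hdelta]
    by_cases h0 : c + pvLineDelta l = 0
    · simp only [h0, ite_true]
      rw [ih 0 "" (acc ++ [cur ++ l ++ "\n"])]
      rw [pvChunks_eq ls]
      cases hs : pvSplitFirst ls 0 with
      | none => simp [List.foldl]
      | some pr => obtain ⟨p, r⟩ := pr; simp [List.foldl, pvRender]
    · simp only [if_neg h0]
      rw [ih (c + pvLineDelta l) (cur ++ l ++ "\n") acc]
      cases hs : pvSplitFirst ls (c + pvLineDelta l) with
      | none => simp
      | some pr => obtain ⟨p, r⟩ := pr; simp [List.foldl]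

-- A's whole loop from the initial state is exactly B's chunk recursion
theorem pvLoopA_eq_pvChunks (lines : List String) : pvLoopA lines 0 "" [] = pvChunks lines := by
  rw [pvLoopA_eq, pvChunks_eq]
  cases hs : pvSplitFirst lines 0 with
  | none => rfl
  | some pr => obtain ⟨p, r⟩ := pr; simp [pvRender]

-- ===== VERDICT (by name: the statement is the Claim_ definition above) =====
theorem get_chunk_strings_spec : Claim_equal_get_chunk_strings := by
  unfold Claim_equal_get_chunk_strings
  intro s _ _
  unfold Spec_get_chunk_strings get_chunk_strings get_chunk_strings_alt
  cases PySem.List.pyGet? (pvSplitNL (pvStripEnds (pvSplitNL s))) 1 with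
  | none => rfl
  | some line1 => exact pvLoopA_eq_pvChunks _
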